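-- pv_equiv track=rewrite | github.com/afalaize/lasie | pypod/pod/tools.py | sortIndices
-- ===== SOURCE A (Python) =====
-- import copy
--
-- def sortIndices(liste):
--     """
--     Return a list of indices so that
--     [liste(i) for i in sortIndices(liste)]
--     is a ordered list with decreasing values.
--     """
--     if not isinstance(liste, list):
--         liste = [element for element in liste]
--     copy_liste = copy.copy(liste)
--     indices = list()
--     while len(copy_liste) > 0:
--         val_max = max(copy_liste)
--         indices.append(liste.index(val_max))
--         copy_liste.pop(copy_liste.index(val_max))
--     return indices
-- ===== SOURCE B (Python) =====
-- def sortIndices(liste):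
--     """
--     Return a list of indices so that
--     [liste(i) for i in sortIndices(liste)]
--     is a ordered list with decreasing values.
--     """
--     if not isinstance(liste, list):
--         liste = [element for element in liste]
--     first = {}
--     for i, v in enumerate(liste):
--         if v not in first:
--             first[v] = i
--     return [first[v] for v in sorted(liste, reverse=True)]
-- ===== Notes on version B (the rewrite author's own statement) =====
-- stated objective: faster
-- what changed: Replaces the quadratic select-max/index/pop while-loop with a first-occurrence index dict built in one pass plus one descending sort, mapping each sorted value to its first index.
import Mathlib
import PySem

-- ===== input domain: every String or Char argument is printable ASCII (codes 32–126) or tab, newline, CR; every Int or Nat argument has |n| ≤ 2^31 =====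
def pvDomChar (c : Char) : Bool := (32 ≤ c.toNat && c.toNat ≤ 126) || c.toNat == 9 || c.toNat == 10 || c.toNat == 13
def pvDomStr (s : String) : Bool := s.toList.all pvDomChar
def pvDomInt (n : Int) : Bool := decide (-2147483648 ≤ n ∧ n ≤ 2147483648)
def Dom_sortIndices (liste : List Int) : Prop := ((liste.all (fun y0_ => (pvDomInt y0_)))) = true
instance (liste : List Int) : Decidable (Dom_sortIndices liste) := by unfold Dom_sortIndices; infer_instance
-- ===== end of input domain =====

-- B replaces A's quadratic select-max/index/pop loop by a first-occurrence dict plus one descending sort (same return value).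

-- ===== PORT A =====
-- termination fact for A's while-loop: popping at a valid index shortens copy_liste
theorem pvPopLt (copy : List Int) (h : 0 < copy.length) :
    ((((PySem.List.pop? copy
        (((PySem.List.index? copy ((PySem.List.max? copy (fun x => x)).getD 0)).getD 0 : Nat) : Int))).map (·.2)).getD []).length
      < copy.length := by
  have hne : copy ≠ [] := by
    intro hnil; simp [hnil] at h
  obtain ⟨m, hm⟩ : ∃ m, PySem.List.max? copy (fun x => x) = some m := by
    cases hmax : PySem.List.max? copy (fun x => x) with
    | none => exact absurd (Iff.mp (PySem.List.max?_eq_none_iff copy _) hmax) hne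
    | some m => exact ⟨m, rfl⟩
  have hmmem : m ∈ copy := PySem.List.max?_mem hm
  obtain ⟨j, hj⟩ : ∃ j, PySem.List.index? copy m = some j := by
    cases hidx : PySem.List.index? copy m with
    | none => exact absurd hmmem (Iff.mp (PySem.List.index?_eq_none_iff copy m) hidx)
    | some j => exact ⟨j, rfl⟩
  obtain ⟨hjlt, -, -⟩ := PySem.List.getElem_of_index?_eq_some hj
  have hpop := PySem.List.pop?_natCast copy j hjlt
  rw [hm, Option.getD_some, hj, Option.getD_some, hpop, Option.map_some, Option.getD_some]
  dsimp only
  have := List.length_eraseIdx_of_lt hjlt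
  omega

-- the while-loop of A: (copy_liste, indices) state
def sortIndicesLoop (liste copy indices : List Int) : List Int :=
  if h : 0 < copy.length then
    let valMax : Int := (PySem.List.max? copy (fun x => x)).getD 0
    let indices' := indices ++ [(((PySem.List.index? liste valMax).getD 0 : Nat) : Int)]
    let copy' := ((PySem.List.pop? copy
        (((PySem.List.index? copy valMax).getD 0 : Nat) : Int)).map (·.2)).getD []
    sortIndicesLoop liste copy' indices'
  else indices
termination_by copy.length
decreasing_by exact pvPopLt copy h

def sortIndices (liste : List Int) : List Int := sortIndicesLoop liste liste []

-- ===== PORT B =====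
-- 'for i, v in enumerate(liste): if v not in first: first[v] = i'
def pvFirstOcc (liste : List Int) : PySem.Dict Int Int :=
  (PySem.List.enumerate liste 0).foldl
    (fun d p => if d.contains p.2 then d else d.insert p.2 p.1) PySem.Dict.empty

-- getD 0 is never the default: every v of sorted(liste) is a key of first (Python's first[v] would KeyError only on a missing key)
def sortIndices_alt (liste : List Int) : List Int :=
  let first := pvFirstOcc liste
  (PySem.List.sorted liste (fun x => x) true).map (fun v => first.getD v 0)

-- ===== PRECONDITION & SPEC =====
def Spec_sortIndices (liste : List Int) (out : List Int) : Prop := out = sortIndices_alt liste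
instance (liste : List Int) (out : List Int) : Decidable (Spec_sortIndices liste out) := by unfold Spec_sortIndices; infer_instance

-- ===== CLAIM (what is proved, stated in full; the proofs are below) =====
def Claim_equal_sortIndices : Prop := ∀ (liste : List Int), Dom_sortIndices liste → Spec_sortIndices liste (sortIndices liste)

-- ===== LEMMAS AND PROOFS =====

-- the first-occurrence dict looks up the first index (offset by the enumerate start)
theorem pvFirstOcc_get? (xs : List Int) (s : Int) (d : PySem.Dict Int Int) (v : Int) :
    ((PySem.List.enumerate xs s).foldl
      (fun d p => if d.contains p.2 then d else d.insert p.2 p.1) d).get? v =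
    ((d.get? v).orElse (fun _ => (PySem.List.index? xs v).map (fun k => s + (k : Int)))) := by
  induction xs generalizing s d with
  | nil =>
    simp only [PySem.List.enumerate_nil, List.foldl_nil, PySem.List.index?_eq_idxOf?]
    cases d.get? v <;> simp [Option.orElse]
  | cons x xs ih =>
    rw [PySem.List.enumerate_cons, List.foldl_cons]
    rw [ih]
    by_cases hv : v = x
    · subst hv
      cases hc : d.contains v with
      | true =>
        simp only [if_true]
        obtain ⟨w, hw⟩ : ∃ w, d.get? v = some w := by
          have := PySem.Dict.contains_eq_isSome_get? d v
          rw [hc] at this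
          cases hg : d.get? v with
          | none => rw [hg] at this; simp at this
          | some w => exact ⟨w, rfl⟩
        simp [hw, Option.orElse]
      | false =>
        simp only [Bool.false_eq_true, if_false]
        have hnone : d.get? v = none := (PySem.Dict.get?_eq_none_iff_contains d v).mpr hc
        rw [PySem.Dict.get?_insert_self, hnone, PySem.List.index?_cons_self]
        simp [Option.orElse]
    · have hstep : (if d.contains x then d else d.insert x s).get? v = d.get? v := by
        split
        · rfl
        · exact PySem.Dict.get?_insert_of_ne d s hv
      rw [hstep, PySem.List.index?_cons_of_ne xs (fun hxv => hv hxv.symm)]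
      cases hg : d.get? v with
      | some w => simp [Option.orElse]
      | none =>
        cases hi : PySem.List.index? xs v with
        | none => simp [Option.orElse]
        | some k =>
          simp [Option.orElse]
          ring

-- descending sort peels off the maximum, then sorts the rest (first occurrence removed)
theorem pvSortedRevCons (copy : List Int) (m : Int)
    (hm : PySem.List.max? copy (fun x => x) = some m) :
    PySem.List.sorted copy (fun x => x) true
      = m :: PySem.List.sorted (copy.erase m) (fun x => x) true := by
  have hmmem : m ∈ copy := PySem.List.max?_mem hm
  apply PySem.List.eq_of_perm_of_pairwise_le_of_injective (key := fun x : Int => -x)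
    neg_injective
  · exact ((PySem.List.sorted_perm copy _ true).trans (List.perm_cons_erase hmmem)).trans
      ((PySem.List.sorted_perm _ _ true).symm.cons m)
  · exact (PySem.List.sorted_pairwise_rev copy _).imp (fun hba => neg_le_neg hba)
  · rw [List.pairwise_cons]
    constructor
    · intro y hy
      have hy' : y ∈ copy :=
        List.mem_of_mem_erase ((PySem.List.mem_sorted _ _ _ y).mp hy)
      exact neg_le_neg (PySem.List.max?_isMax hm y hy')
    · exact (PySem.List.sorted_pairwise_rev _ _).imp (fun hba => neg_le_neg hba)

-- removing position pre.length from pre ++ v :: suf drops the v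
theorem pvEraseIdxAppend (pre suf : List Int) (v : Int) :
    (pre ++ v :: suf).eraseIdx pre.length = pre ++ suf := by
  induction pre with
  | nil => simp
  | cons x xs ih => simpa using ih

-- eraseIdx at the first index of v is erase v
theorem pvEraseIdx_index? (xs : List Int) (v : Int) (j : Nat)
    (h : PySem.List.index? xs v = some j) : xs.eraseIdx j = xs.erase v := by
  obtain ⟨pre, suf, hx, hlen, hnp⟩ := Iff.mp (PySem.List.index?_eq_some_iff xs v j) h
  subst hx
  subst hlen
  rw [List.erase_append_right _ hnp, List.erase_cons_head]
  exact pvEraseIdxAppend pre suf v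

-- A's loop emits the first index (in liste) of each value of copy, in descending value order
theorem pvLoopEq (liste copy indices : List Int) (hsub : ∀ v ∈ copy, v ∈ liste) :
    sortIndicesLoop liste copy indices
      = indices ++ (PySem.List.sorted copy (fun x => x) true).map
          (fun v => (((PySem.List.index? liste v).getD 0 : Nat) : Int)) := by
  by_cases h : 0 < copy.length
  · have hne : copy ≠ [] := by intro hnil; simp [hnil] at h
    obtain ⟨m, hm⟩ : ∃ m, PySem.List.max? copy (fun x => x) = some m := by
      cases hmax : PySem.List.max? copy (fun x => x) with
      | none => exact absurd (Iff.mp (PySem.List.max?_eq_none_iff copy _) hmax) hne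
      | some m => exact ⟨m, rfl⟩
    have hmmem : m ∈ copy := PySem.List.max?_mem hm
    obtain ⟨j, hj⟩ : ∃ j, PySem.List.index? copy m = some j := by
      cases hidx : PySem.List.index? copy m with
      | none => exact absurd hmmem (Iff.mp (PySem.List.index?_eq_none_iff copy m) hidx)
      | some j => exact ⟨j, rfl⟩
    obtain ⟨hjlt, -, -⟩ := PySem.List.getElem_of_index?_eq_some hj
    have hpop := PySem.List.pop?_natCast copy j hjlt
    rw [sortIndicesLoop, dif_pos h]
    dsimp only
    rw [hm, Option.getD_some, hj, Option.getD_some, hpop, Option.map_some, Option.getD_some,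
      pvEraseIdx_index? copy m j hj]
    rw [pvLoopEq liste (copy.erase m) _
      (fun v hv => hsub v (List.mem_of_mem_erase hv))]
    rw [pvSortedRevCons copy m hm, List.map_cons, List.append_assoc, List.singleton_append]
  · have hnil : copy = [] := by
      cases copy with
      | nil => rfl
      | cons x xs => simp at h
    subst hnil
    rw [sortIndicesLoop]
    simp [PySem.List.sorted]
termination_by copy.length
decreasing_by
  have := List.length_erase_of_mem hmmem
  omega

-- ===== VERDICT (by name: the statement is the Claim_ definition above) =====
theorem sortIndices_spec : Claim_equal_sortIndices := by
  intro liste _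
  unfold Spec_sortIndices sortIndices sortIndices_alt
  rw [pvLoopEq liste liste [] (fun _ h => h)]
  simp only [List.nil_append]
  apply List.map_congr_left
  intro v hv
  have hvmem : v ∈ liste := Iff.mp (PySem.List.mem_sorted liste _ true v) hv
  obtain ⟨k, hk⟩ : ∃ k, PySem.List.index? liste v = some k := by
    cases hidx : PySem.List.index? liste v with
    | none => exact absurd hvmem (Iff.mp (PySem.List.index?_eq_none_iff liste v) hidx)
    | some k => exact ⟨k, rfl⟩
  have hget := pvFirstOcc_get? liste 0 PySem.Dict.empty v
  rw [PySem.Dict.getD_eq_get?_getD, pvFirstOcc]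
  rw [hget]
  simp only [PySem.List.index?_eq_idxOf?] at hk
  simp [hk]
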